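-- pv_equiv track=rewrite | github.com/ParimaSA/oop_lesson_2 | combination_gen.py | gen_comb_list
-- ===== SOURCE A (Python) =====
-- def gen_comb_list(list_set):
--     """
--         Parameters:
--             list_set: a list of lists where each contains at least one element
--
--         Returns:
--             a list of lists, each of which is made from a combination of elements in each list in list_set
--
--         Examples:
--             gen_comb_list([[1, 2, 3]]) returns [[1], [2], [3]]
--             gen_comb_list([[1, 2, 3], [4, 5]]) returns [[1, 4], [2, 4], [3, 4], [1, 5], [2, 5], [3, 5]]
--             gen_comb_list([[1, 2, 3], [4, 5], [6, 7, 8]]) returns [[1, 4, 6], [2, 4, 6], [3, 4, 6], [1, 5, 6], [2, 5, 6], [3, 5, 6], [1, 4, 7], [2, 4, 7], [3, 4, 7], [1, 5, 7], [2, 5, 7], [3, 5, 7], [1, 4, 8], [2, 4, 8], [3, 4, 8], [1, 5, 8], [2, 5, 8], [3, 5, 8]]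
--     """
--
--     num_list = [len(x) for x in list_set]
--     num_now = [0 for x in num_list]
--     answer = []
--     while num_now[-1] < num_list[-1]:
--         add = []
--         for i in range(len(list_set)):
--             add.append(list_set[i][num_now[i]])
--         answer.append(add)
--         num_now[0] += 1
--         for i in range(len(list_set) - 1):
--             if num_now[i] == num_list[i]:
--                 num_now[i] = 0
--                 num_now[i + 1] += 1
--
--     return answer
-- ===== SOURCE B (Python) =====
-- def gen_comb_list(list_set):
--     # Build the product incrementally: earlier positions vary fastest (column-major),
--     # so each new list extends every partial row, with the new element varying slowest.
--     result = [[]]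
--     for lst in list_set:
--         result = [prev + [x] for x in lst for prev in result]
--     return result
-- ===== Notes on version B (the rewrite author's own statement) =====
-- stated objective: simpler
-- what changed: Replaces the mixed-radix carry counter and while loop with an incremental fold: start from [[]] and extend every partial row by each element of the next list, which yields the same column-major order with no index or carry bookkeeping.
-- outside the precondition, e.g. on gen_comb_list([]): A raises IndexError, B returns [[]]; on gen_comb_list([[], [1]]): A raises IndexError, B returns []
import Mathlib
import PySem

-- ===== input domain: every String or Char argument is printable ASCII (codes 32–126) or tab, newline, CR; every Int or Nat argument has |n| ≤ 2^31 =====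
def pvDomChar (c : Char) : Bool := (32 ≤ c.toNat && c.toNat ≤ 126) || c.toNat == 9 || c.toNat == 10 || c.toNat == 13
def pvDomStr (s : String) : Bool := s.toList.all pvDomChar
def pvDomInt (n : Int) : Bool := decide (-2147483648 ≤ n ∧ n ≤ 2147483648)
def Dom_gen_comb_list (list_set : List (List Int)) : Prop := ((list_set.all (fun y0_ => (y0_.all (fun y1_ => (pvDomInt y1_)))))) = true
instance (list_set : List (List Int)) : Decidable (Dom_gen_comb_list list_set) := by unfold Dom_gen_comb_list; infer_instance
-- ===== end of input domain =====

-- B replaces A's mixed-radix carry counter with an incremental fold over the lists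
-- (objective: simpler); equal return values are proved on Pre_ (where A does not raise).

-- ===== PORT A =====
-- add = []; for i in range(len(list_set)): add.append(list_set[i][num_now[i]])
-- (the .getD defaults are never used inside Pre_: Python would raise IndexError there)
def aRow (list_set : List (List Int)) (num_now : List Int) : List Int :=
  (List.range list_set.length).foldl
    (fun add i =>
      add ++ [(PySem.List.pyGet? ((PySem.List.pyGet? list_set (i : Int)).getD [])
                 ((PySem.List.pyGet? num_now (i : Int)).getD 0)).getD 0]) []

-- for i in range(m - 1): if num_now[i] == num_list[i]: num_now[i] = 0; num_now[i+1] += 1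
def aCarry (m : Nat) (num_list : List Int) (num_now : List Int) : List Int :=
  (List.range (m - 1)).foldl
    (fun c i => if c.getD i 0 == num_list.getD i 0 then (c.set i 0).modify (i + 1) (· + 1) else c)
    num_now

-- the while loop; fuel only makes it total (it is never exhausted: the loop runs at most
-- prod(lengths) times); the .getD 0 on the guard indices is only reached outside Pre_
def aLoop (list_set : List (List Int)) (num_list : List Int) :
    Nat → List Int → List (List Int) → List (List Int)
  | 0, _, answer => answer
  | fuel + 1, num_now, answer =>
    if (PySem.List.pyGet? num_now (-1)).getD 0 < (PySem.List.pyGet? num_list (-1)).getD 0 then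
      aLoop list_set num_list fuel
        (aCarry list_set.length num_list (num_now.modify 0 (· + 1)))
        (answer ++ [aRow list_set num_now])
    else answer

def gen_comb_list (list_set : List (List Int)) : List (List Int) :=
  let num_list := list_set.map (fun x => (x.length : Int))
  let num_now := num_list.map (fun _ => (0 : Int))
  aLoop list_set num_list ((list_set.map List.length).prod + 1) num_now []

-- ===== PORT B =====
-- result = [[]]; for lst in list_set: result = [prev + [x] for x in lst for prev in result]
def gen_comb_list_alt (list_set : List (List Int)) : List (List Int) :=
  list_set.foldl (fun result lst => lst.flatMap (fun x => result.map (fun prev => prev ++ [x]))) [[]]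

-- ===== PRECONDITION & SPEC =====
-- Pre_ excludes exactly the inputs where A raises IndexError: the empty list_set
-- (num_now[-1]), and a non-final empty inner list reached while the last list is nonempty.
def Pre_gen_comb_list (list_set : List (List Int)) : Prop :=
  list_set ≠ [] ∧ (list_set.getLastD [] ≠ [] → ∀ l ∈ list_set, l ≠ [])
instance (list_set : List (List Int)) : Decidable (Pre_gen_comb_list list_set) := by
  unfold Pre_gen_comb_list; infer_instance

def pvWitness_gen_comb_list : List (List Int) := [[1, 2, 3], [4, 5]]

def Spec_gen_comb_list (list_set : List (List Int)) (out : List (List Int)) : Prop :=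
  out = gen_comb_list_alt list_set
instance (list_set : List (List Int)) (out : List (List Int)) :
    Decidable (Spec_gen_comb_list list_set out) := by unfold Spec_gen_comb_list; infer_instance

-- ===== CLAIM (what is proved, stated in full; the proofs are below) =====
def Claim_equal_gen_comb_list : Prop :=
  ∀ (list_set : List (List Int)), Dom_gen_comb_list list_set → Pre_gen_comb_list list_set →
    Spec_gen_comb_list list_set (gen_comb_list list_set)

-- ===== LEMMAS AND PROOFS =====


-- the radix vector num_list
def radixC (ls : List (List Int)) : List Int := ls.map (fun x => (x.length : Int))

-- the Cartesian product in A's column-major order, built structurally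
def enumC : List (List Int) → List (List Int)
  | [] => [[]]
  | l :: ls => (enumC ls).flatMap (fun r => l.map (fun x => x :: r))

-- the row A emits at counter state c
def decRow : List Int → List (List Int) → List Int
  | d :: ds, l :: ls => l.getD d.toNat 0 :: decRow ds ls
  | _, _ => []

-- the rows A still has to emit from counter state c on
def remC : List Int → List (List Int) → List (List Int)
  | [d], [l] => (l.drop d.toNat).map (fun x => [x])
  | d :: ds, l :: ls =>
    match remC ds ls with
    | [] => []
    | r :: rs => (l.drop d.toNat).map (fun x => x :: r) ++ rs.flatMap (fun r' => l.map (fun x => x :: r'))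
  | _, _ => []

-- the Lean-level counter increment (what one Python inc-and-carry pass computes)
def incL : List Int → List Int → List Int
  | [d], [_] => [d + 1]
  | d :: ds, n :: ns => if d + 1 = n then 0 :: incL ds ns else (d + 1) :: ds
  | c, _ => c

-- loop-head counter invariant: non-final digits in [0, nᵢ), final digit in [0, n_last]
def validC : List Int → List (List Int) → Prop
  | [d], [l] => 0 ≤ d ∧ d ≤ (l.length : Int)
  | d :: ds, l :: ls => 0 ≤ d ∧ d < (l.length : Int) ∧ validC ds ls
  | _, _ => False

-- the while guard num_now[-1] < num_list[-1], structurally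
def lastLt : List Int → List (List Int) → Prop
  | [d], [l] => d < (l.length : Int)
  | _ :: ds, _ :: ls => lastLt ds ls
  | _, _ => False

def allNE (ls : List (List Int)) : Prop := ∀ l ∈ ls, l ≠ []

theorem pyGet_neg_one {α : Type} (xs : List α) : PySem.List.pyGet? xs (-1) = xs.getLast? := by
  cases xs with
  | nil => rfl
  | cons x t => simp [PySem.List.pyGet?, PySem.List.pyIdx?, List.getLast?_eq_getElem?]

-- unconditional cons-equations for the pattern-matched definitions (robust against
-- non-literal middle arguments)
theorem validC_cons (d : Int) (c : List Int) (l l2 : List Int) (ls : List (List Int)) :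
    validC (d :: c) (l :: l2 :: ls)
      ↔ (0 ≤ d ∧ d < (l.length : Int) ∧ validC c (l2 :: ls)) := by
  cases c <;> simp [validC]

theorem lastLt_cons (d : Int) (c : List Int) (l l2 : List Int) (ls : List (List Int)) :
    lastLt (d :: c) (l :: l2 :: ls) ↔ lastLt c (l2 :: ls) := by
  cases c <;> simp [lastLt]

theorem remC_cons (d : Int) (c : List Int) (l l2 : List Int) (ls : List (List Int)) :
    remC (d :: c) (l :: l2 :: ls)
      = (match remC c (l2 :: ls) with
         | [] => []
         | r :: rs => (l.drop d.toNat).map (fun x => x :: r)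
             ++ rs.flatMap (fun r' => l.map (fun x => x :: r'))) := by
  cases c <;> simp [remC]

theorem incL_cons (d : Int) (c : List Int) (n n2 : Int) (ns : List Int) :
    incL (d :: c) (n :: n2 :: ns)
      = if d + 1 = n then 0 :: incL c (n2 :: ns) else (d + 1) :: c := by
  cases c <;> simp [incL]

theorem incL_shape (d : Int) (c ns : List Int) : ∃ x X, incL (d :: c) ns = x :: X := by
  rcases c with _ | ⟨e, c⟩ <;> rcases ns with _ | ⟨n, ns⟩
  · exact ⟨_, _, rfl⟩
  · rcases ns with _ | ⟨n2, ns⟩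
    · exact ⟨_, _, rfl⟩
    · rw [incL_cons]; split <;> exact ⟨_, _, rfl⟩
  · exact ⟨_, _, rfl⟩
  · rcases ns with _ | ⟨n2, ns⟩
    · show ∃ x X, (if d + 1 = n then 0 :: incL (e :: c) [] else (d + 1) :: e :: c) = x :: X
      split
      · exact ⟨_, _, rfl⟩
      · exact ⟨_, _, rfl⟩
    · rw [incL_cons]; split <;> exact ⟨_, _, rfl⟩

theorem enumC_len (ls : List (List Int)) : (enumC ls).length = (ls.map List.length).prod := by
  induction ls with
  | nil => rfl
  | cons l ls ih =>
    simp [enumC, List.length_flatMap, ih]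
    exact Nat.mul_comm _ _

theorem enumC_ne (ls : List (List Int)) (h : allNE ls) : enumC ls ≠ [] := by
  induction ls with
  | nil => simp [enumC]
  | cons l ls ih =>
    intro hnil
    rw [enumC, List.flatMap_eq_nil_iff] at hnil
    obtain ⟨r, hr⟩ := List.exists_mem_of_ne_nil _ (ih (fun x hx => h x (List.mem_cons_of_mem _ hx)))
    have := hnil r hr
    rw [List.map_eq_nil_iff] at this
    exact h l List.mem_cons_self this

theorem enumC_nil_of_mem (ls : List (List Int)) (hl : [] ∈ ls) : enumC ls = [] := by
  induction ls with
  | nil => cases hl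
  | cons a ls ih =>
    rcases List.mem_cons.mp hl with h | h
    · simp [enumC, ← h]
    · simp [enumC, ih h]

-- B's fold equals the structural product
theorem foldB (ls : List (List Int)) (acc : List (List Int)) :
    ls.foldl (fun result lst => lst.flatMap (fun x => result.map (fun prev => prev ++ [x]))) acc
      = (enumC ls).flatMap (fun r => acc.map (fun p => p ++ r)) := by
  induction ls generalizing acc with
  | nil => simp [enumC]
  | cons l ls ih =>
    rw [List.foldl_cons, ih, enumC, List.flatMap_assoc]
    apply List.flatMap_congr
    intro r hr
    simp [List.map_flatMap, List.flatMap_map, List.map_map, Function.comp_def, List.append_assoc]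

theorem altB (ls : List (List Int)) : gen_comb_list_alt ls = enumC ls := by
  rw [gen_comb_list_alt, foldB]
  simp

theorem valid_shape (c : List Int) (ls : List (List Int)) (h : validC c ls) :
    c.length = ls.length := by
  induction c, ls using validC.induct with
  | case1 d l => rfl
  | case2 d ds l ls h2 ih =>
    rcases ds with _ | ⟨e, ds⟩ <;> rcases ls with _ | ⟨l2, ls⟩
    · exact (h2 rfl rfl).elim
    · simp [validC] at h
    · simp [validC] at h
    · obtain ⟨-, -, hv⟩ := (validC_cons _ _ _ _ _).mp h
      simpa using ih hv
  | case3 c ls h1 h2 =>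
    rcases c with _ | ⟨d, ds⟩ <;> rcases ls with _ | ⟨l, ls⟩
    · simp [validC] at h
    · simp [validC] at h
    · simp [validC] at h
    · exact (h2 _ _ _ _ rfl rfl).elim

theorem valid_lt (c : List Int) (ls : List (List Int)) (h : validC c ls) :
    ∀ j, j + 1 < c.length → c.getD j 0 < (radixC ls).getD j 0 := by
  induction c, ls using validC.induct with
  | case1 d l => intro j hj; simp at hj
  | case2 d ds l ls h2 ih =>
    rcases ds with _ | ⟨e, ds⟩ <;> rcases ls with _ | ⟨l2, ls⟩
    · exact (h2 rfl rfl).elim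
    · simp [validC] at h
    · simp [validC] at h
    · obtain ⟨h0, hd, hv⟩ := (validC_cons _ _ _ _ _).mp h
      intro j hj
      cases j with
      | zero => simpa [radixC] using hd
      | succ j =>
        simp only [List.getD_cons_succ, radixC, List.map_cons]
        exact ih hv j (by simpa using hj)
  | case3 c ls h1 h2 =>
    rcases c with _ | ⟨d, ds⟩ <;> rcases ls with _ | ⟨l, ls⟩
    · simp [validC] at h
    · simp [validC] at h
    · simp [validC] at h
    · exact (h2 _ _ _ _ rfl rfl).elim

theorem valid_zero (ls : List (List Int)) (hne : ls ≠ []) (h : allNE ls) :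
    validC (ls.map (fun _ => (0 : Int))) ls := by
  induction ls with
  | nil => exact (hne rfl).elim
  | cons l ls ih =>
    cases ls with
    | nil =>
      refine ⟨le_refl _, ?_⟩
      show (0 : Int) ≤ (l.length : Int)
      exact_mod_cast Nat.zero_le _
    | cons l2 ls' =>
      rw [List.map_cons, validC_cons]
      refine ⟨le_refl _, ?_, ?_⟩
      · exact_mod_cast List.length_pos_iff.mpr (h l List.mem_cons_self)
      · exact ih (by simp) (fun x hx => h x (List.mem_cons_of_mem _ hx))

theorem lastLt_iff (c : List Int) (ls : List (List Int)) (h : validC c ls) :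
    ((c.getLast?).getD 0 < ((radixC ls).getLast?).getD 0) ↔ lastLt c ls := by
  induction c, ls using validC.induct with
  | case1 d l => simp [radixC, lastLt]
  | case2 d ds l ls h2 ih =>
    rcases ds with _ | ⟨e, ds⟩ <;> rcases ls with _ | ⟨l2, ls⟩
    · exact (h2 rfl rfl).elim
    · simp [validC] at h
    · simp [validC] at h
    · obtain ⟨-, -, hv⟩ := (validC_cons _ _ _ _ _).mp h
      rw [List.getLast?_cons_cons, lastLt_cons, ← ih hv]
      simp [radixC, List.getLast?_cons_cons]
  | case3 c ls h1 h2 =>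
    rcases c with _ | ⟨d, ds⟩ <;> rcases ls with _ | ⟨l, ls⟩
    · simp [validC] at h
    · simp [validC] at h
    · simp [validC] at h
    · exact (h2 _ _ _ _ rfl rfl).elim

theorem guard_iff (c : List Int) (ls : List (List Int)) (h : validC c ls) :
    ((PySem.List.pyGet? c (-1)).getD 0 < (PySem.List.pyGet? (radixC ls) (-1)).getD 0)
      ↔ lastLt c ls := by
  rw [pyGet_neg_one, pyGet_neg_one]
  exact lastLt_iff c ls h

theorem remC_nil (c : List Int) (ls : List (List Int)) (h : validC c ls) (hn : ¬ lastLt c ls) :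
    remC c ls = [] := by
  induction c, ls using validC.induct with
  | case1 d l =>
    obtain ⟨h0, hle⟩ := h
    have hge : l.length ≤ d.toNat := by
      by_contra hc
      exact hn (by simpa [lastLt] using (by omega : d < (l.length : Int)))
    simp [remC, List.drop_eq_nil_iff.mpr hge]
  | case2 d ds l ls h2 ih =>
    rcases ds with _ | ⟨e, ds⟩ <;> rcases ls with _ | ⟨l2, ls⟩
    · exact (h2 rfl rfl).elim
    · simp [validC] at h
    · simp [validC] at h
    · obtain ⟨-, -, hv⟩ := (validC_cons _ _ _ _ _).mp h
      rw [remC_cons, ih hv (fun hl => hn ((lastLt_cons _ _ _ _ _).mpr hl))]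
  | case3 c ls h1 h2 =>
    rcases c with _ | ⟨d, ds⟩ <;> rcases ls with _ | ⟨l, ls⟩
    · simp [validC] at h
    · simp [validC] at h
    · simp [validC] at h
    · exact (h2 _ _ _ _ rfl rfl).elim

theorem remC_step (c : List Int) (ls : List (List Int)) (h : validC c ls) (hlt : lastLt c ls) :
    remC c ls = decRow c ls :: remC (incL c (radixC ls)) ls := by
  induction c, ls using validC.induct with
  | case1 d l =>
    obtain ⟨h0, -⟩ := h
    have hd : d < (l.length : Int) := hlt
    have hdn : d.toNat < l.length := by omega
    have hsucc : (d + 1).toNat = d.toNat + 1 := by omega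
    rw [show radixC [l] = [(l.length : Int)] by simp [radixC]]
    rw [show incL [d] [(l.length : Int)] = [d + 1] from rfl]
    rw [show remC [d] [l] = (l.drop d.toNat).map (fun x => [x]) from rfl,
        show remC [d + 1] [l] = (l.drop (d + 1).toNat).map (fun x => [x]) from rfl,
        show decRow [d] [l] = [l.getD d.toNat 0] from rfl]
    rw [List.drop_eq_getElem_cons hdn, hsucc, List.map_cons, List.getD_eq_getElem l 0 hdn]
  | case2 d ds l ls h2 ih =>
    rcases ds with _ | ⟨e, ds⟩ <;> rcases ls with _ | ⟨l2, ls⟩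
    · exact (h2 rfl rfl).elim
    · simp [validC] at h
    · simp [validC] at h
    · obtain ⟨h0, hd, hv⟩ := (validC_cons _ _ _ _ _).mp h
      have hlt' : lastLt (e :: ds) (l2 :: ls) := (lastLt_cons _ _ _ _ _).mp hlt
      have hdn : d.toNat < l.length := by omega
      have hsucc : (d + 1).toNat = d.toNat + 1 := by omega
      have hih := ih hv hlt'
      have hr2 : radixC (l :: l2 :: ls)
          = (l.length : Int) :: (l2.length : Int) :: radixC ls := by simp [radixC]
      have hr1 : radixC (l2 :: ls) = (l2.length : Int) :: radixC ls := by simp [radixC]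
      rw [hr2, incL_cons, ← hr1]
      rw [show decRow (d :: e :: ds) (l :: l2 :: ls)
            = l.getD d.toNat 0 :: decRow (e :: ds) (l2 :: ls) from rfl]
      by_cases hcase : d + 1 = (l.length : Int)
      · rw [if_pos hcase, remC_cons, hih, remC_cons]
        have hdrop : l.drop (d.toNat + 1) = [] := List.drop_eq_nil_iff.mpr (by omega)
        cases hrs : remC (incL (e :: ds) (radixC (l2 :: ls))) (l2 :: ls) with
        | nil =>
          simp [List.drop_eq_getElem_cons hdn, hdrop, List.getElem?_eq_getElem hdn]
        | cons r' rs' =>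
          simp [List.drop_eq_getElem_cons hdn, hdrop, List.getElem?_eq_getElem hdn]
      · rw [if_neg hcase, remC_cons, hih, remC_cons, hih]
        simp only [List.drop_eq_getElem_cons hdn, hsucc, List.map_cons, List.cons_append,
          List.getD_eq_getElem?_getD, List.getElem?_eq_getElem hdn, Option.getD_some]
  | case3 c ls h1 h2 =>
    rcases c with _ | ⟨d, ds⟩ <;> rcases ls with _ | ⟨l, ls⟩
    · simp [validC] at h
    · simp [validC] at h
    · simp [validC] at h
    · exact (h2 _ _ _ _ rfl rfl).elim

theorem valid_inc (c : List Int) (ls : List (List Int)) (h : validC c ls) (hlt : lastLt c ls)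
    (hne : allNE ls) : validC (incL c (radixC ls)) ls := by
  induction c, ls using validC.induct with
  | case1 d l =>
    obtain ⟨h0, -⟩ := h
    have hd : d < (l.length : Int) := hlt
    rw [show incL [d] (radixC [l]) = [d + 1] by simp [incL, radixC]]
    exact ⟨by omega, by omega⟩
  | case2 d ds l ls h2 ih =>
    rcases ds with _ | ⟨e, ds⟩ <;> rcases ls with _ | ⟨l2, ls⟩
    · exact (h2 rfl rfl).elim
    · simp [validC] at h
    · simp [validC] at h
    · obtain ⟨h0, hd, hv⟩ := (validC_cons _ _ _ _ _).mp h
      have hlt' : lastLt (e :: ds) (l2 :: ls) := (lastLt_cons _ _ _ _ _).mp hlt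
      have hne' : allNE (l2 :: ls) := fun x hx => hne x (List.mem_cons_of_mem _ hx)
      have hr2 : radixC (l :: l2 :: ls)
          = (l.length : Int) :: (l2.length : Int) :: radixC ls := by simp [radixC]
      have hr1 : radixC (l2 :: ls) = (l2.length : Int) :: radixC ls := by simp [radixC]
      rw [hr2, incL_cons, ← hr1]
      by_cases hcase : d + 1 = (l.length : Int)
      · rw [if_pos hcase]
        obtain ⟨x, X, hX⟩ := incL_shape e ds (radixC (l2 :: ls))
        rw [hX, validC_cons, ← hX]
        refine ⟨le_refl _, ?_, ih hv hlt' hne'⟩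
        exact_mod_cast List.length_pos_iff.mpr (hne l List.mem_cons_self)
      · rw [if_neg hcase, validC_cons]
        exact ⟨by omega, by omega, hv⟩
  | case3 c ls h1 h2 =>
    rcases c with _ | ⟨d, ds⟩ <;> rcases ls with _ | ⟨l, ls⟩
    · simp [validC] at h
    · simp [validC] at h
    · simp [validC] at h
    · exact (h2 _ _ _ _ rfl rfl).elim

theorem remC_zero (ls : List (List Int)) (hne : ls ≠ []) (h : allNE ls) :
    remC (ls.map (fun _ => (0 : Int))) ls = enumC ls := by
  induction ls with
  | nil => exact (hne rfl).elim
  | cons l ls ih =>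
    cases ls with
    | nil => simp [remC, enumC]
    | cons l2 ls' =>
      have hall' : allNE (l2 :: ls') := fun x hx => h x (List.mem_cons_of_mem _ hx)
      have hih := ih (by simp) hall'
      rw [List.map_cons, remC_cons, hih]
      have hnn : enumC (l2 :: ls') ≠ [] := enumC_ne _ hall'
      rcases he : enumC (l2 :: ls') with _ | ⟨r, rs⟩
      · exact (hnn he).elim
      · rw [show enumC (l :: l2 :: ls')
              = (enumC (l2 :: ls')).flatMap (fun r => l.map (fun x => x :: r)) from rfl, he]
        simp

-- the carry pass, as a fold with explicit index list
def cstep (nl : List Int) (c : List Int) (i : Nat) : List Int :=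
  if c.getD i 0 == nl.getD i 0 then (c.set i 0).modify (i + 1) (· + 1) else c

theorem aCarry_eq_foldl (m : Nat) (nl c : List Int) :
    aCarry m nl c = (List.range (m - 1)).foldl (cstep nl) c := rfl

theorem cstep_succ (nl : List Int) (x : Int) (c : List Int) (i : Nat) :
    cstep nl (x :: c) (i + 1) = x :: cstep nl.tail c i := by
  have hnl : nl.getD (i + 1) 0 = nl.tail.getD i 0 := by cases nl <;> simp
  simp only [cstep, List.getD_cons_succ, hnl]
  split
  · rw [List.set_cons_succ, List.modify_succ_cons]
  · rfl

theorem foldl_cstep_shift (nl : List Int) (idxs : List Nat) (x : Int) (c : List Int) :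
    (idxs.map Nat.succ).foldl (cstep nl) (x :: c) = x :: idxs.foldl (cstep nl.tail) c := by
  induction idxs generalizing c with
  | nil => rfl
  | cons i idxs ih => simp only [List.map_cons, List.foldl_cons, cstep_succ, ih]

theorem foldl_cstep_nofire (nl : List Int) (idxs : List Nat) (c : List Int)
    (h : ∀ i ∈ idxs, ¬ (c.getD i 0 = nl.getD i 0)) : idxs.foldl (cstep nl) c = c := by
  induction idxs with
  | nil => rfl
  | cons i idxs ih =>
    rw [List.foldl_cons, show cstep nl c i = c by
      simp only [cstep]
      rw [if_neg (by simpa using h i List.mem_cons_self)]]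
    exact ih (fun j hj => h j (List.mem_cons_of_mem _ hj))

theorem carry_eq (ls : List (List Int)) (c : List Int) (h : validC c ls) (hne : allNE ls) :
    aCarry ls.length (radixC ls) (c.modify 0 (· + 1)) = incL c (radixC ls) := by
  induction c, ls using validC.induct with
  | case1 d l =>
    simp [aCarry_eq_foldl, incL, radixC, List.modify_zero_cons]
  | case2 d ds l ls h2 ih =>
    rcases ds with _ | ⟨e, ds⟩ <;> rcases ls with _ | ⟨l2, ls⟩
    · exact (h2 rfl rfl).elim
    · simp [validC] at h
    · simp [validC] at h
    · obtain ⟨h0, hd, hv⟩ := (validC_cons _ _ _ _ _).mp h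
      have hne' : allNE (l2 :: ls) := fun x hx => hne x (List.mem_cons_of_mem _ hx)
      have hr2 : radixC (l :: l2 :: ls)
          = (l.length : Int) :: (l2.length : Int) :: radixC ls := by simp [radixC]
      have hr1 : radixC (l2 :: ls) = (l2.length : Int) :: radixC ls := by simp [radixC]
      rw [hr2, incL_cons, ← hr1, aCarry_eq_foldl]
      have hlen : (l :: l2 :: ls).length - 1 = ((l2 :: ls).length - 1) + 1 := by simp
      rw [hlen, List.range_succ_eq_map, List.foldl_cons, List.modify_zero_cons]
      by_cases hcase : d + 1 = (l.length : Int)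
      · rw [if_pos hcase]
        rw [show cstep ((l.length : Int) :: radixC (l2 :: ls)) ((d + 1) :: e :: ds) 0
              = 0 :: (e :: ds).modify 0 (· + 1) by
            simp [cstep, hcase, List.modify_succ_cons]]
        rw [foldl_cstep_shift, List.tail_cons, ← aCarry_eq_foldl, ih hv hne']
      · rw [if_neg hcase]
        rw [show cstep ((l.length : Int) :: radixC (l2 :: ls)) ((d + 1) :: e :: ds) 0
              = (d + 1) :: e :: ds by
            simp only [cstep, List.getD_cons_zero]
            rw [if_neg (by simpa using hcase)]]
        rw [foldl_cstep_shift, List.tail_cons]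
        congr 1
        apply foldl_cstep_nofire
        intro j hj
        rw [List.mem_range] at hj
        have hsh := valid_shape _ _ hv
        have hlt := valid_lt _ _ hv j (by simp only [List.length_cons] at hsh hj ⊢; omega)
        omega
  | case3 c ls h1 h2 =>
    rcases c with _ | ⟨d, ds⟩ <;> rcases ls with _ | ⟨l, ls⟩
    · simp [validC] at h
    · simp [validC] at h
    · simp [validC] at h
    · exact (h2 _ _ _ _ rfl rfl).elim

theorem rowMap (c : List Int) (ls : List (List Int)) (h : validC c ls) :
    (List.range ls.length).map (fun (i : Nat) =>
        (PySem.List.pyGet? ((PySem.List.pyGet? ls (↑i)).getD [])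
          ((PySem.List.pyGet? c (↑i)).getD 0)).getD 0) = decRow c ls := by
  induction c, ls using validC.induct with
  | case1 d l =>
    obtain ⟨h0, -⟩ := h
    rw [show ([l] : List (List Int)).length = 1 from rfl, List.range_one, List.map_cons,
      List.map_nil, show decRow [d] [l] = [l.getD d.toNat 0] from rfl]
    congr 1
    simp only [PySem.List.pyGet?_natCast, List.getElem?_cons_zero, Option.getD_some]
    rw [show d = ((d.toNat : Nat) : Int) by omega, PySem.List.pyGet?_natCast]
    simp [List.getD_eq_getElem?_getD]
    rw [show (max d 0).toNat = d.toNat by omega]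
  | case2 d ds l ls h2 ih =>
    rcases ds with _ | ⟨e, ds⟩ <;> rcases ls with _ | ⟨l2, ls⟩
    · exact (h2 rfl rfl).elim
    · simp [validC] at h
    · simp [validC] at h
    · obtain ⟨h0, hd, hv⟩ := (validC_cons _ _ _ _ _).mp h
      rw [show (l :: l2 :: ls).length = (l2 :: ls).length + 1 from rfl, List.range_succ_eq_map,
        List.map_cons, List.map_map,
        show decRow (d :: e :: ds) (l :: l2 :: ls)
          = l.getD d.toNat 0 :: decRow (e :: ds) (l2 :: ls) from rfl]
      congr 1
      · simp only [PySem.List.pyGet?_natCast, List.getElem?_cons_zero, Option.getD_some]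
        rw [show d = ((d.toNat : Nat) : Int) by omega, PySem.List.pyGet?_natCast]
        simp [List.getD_eq_getElem?_getD]
        rw [show (max d 0).toNat = d.toNat by omega]
      · rw [← ih hv]
        apply List.map_congr_left
        intro i hi
        simp [Nat.succ_eq_add_one, PySem.List.pyGet?_natCast]
  | case3 c ls h1 h2 =>
    rcases c with _ | ⟨d, ds⟩ <;> rcases ls with _ | ⟨l, ls⟩
    · simp [validC] at h
    · simp [validC] at h
    · simp [validC] at h
    · exact (h2 _ _ _ _ rfl rfl).elim

theorem row_eq (ls : List (List Int)) (c : List Int) (h : validC c ls) :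
    aRow ls c = decRow c ls := by
  rw [aRow, PySem.List.foldl_append_singleton_eq_map, List.nil_append]
  simp only [bind_pure_comp, List.map_eq_map, List.map_map, Function.comp_def]
  exact rowMap c ls h

theorem loop_eq (ls : List (List Int)) (hne : allNE ls) :
    ∀ (fuel : Nat) (c : List Int) (answer : List (List Int)), validC c ls →
      (remC c ls).length < fuel →
      aLoop ls (radixC ls) fuel c answer = answer ++ remC c ls := by
  intro fuel
  induction fuel with
  | zero => intro c answer _ hf; omega
  | succ fuel ih =>
    intro c answer hv hf
    rw [aLoop]
    by_cases hlt : lastLt c ls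
    · rw [if_pos ((guard_iff c ls hv).mpr hlt)]
      rw [row_eq ls c hv, carry_eq ls c hv hne]
      have hstep := remC_step c ls hv hlt
      rw [ih _ _ (valid_inc c ls hv hlt hne) (by rw [hstep] at hf; simp at hf; omega)]
      rw [hstep]
      simp
    · rw [if_neg (by rw [guard_iff c ls hv]; exact hlt)]
      rw [remC_nil c ls hv hlt, List.append_nil]

-- ===== VERDICT (by name: the statement is the Claim_ definition above) =====
theorem gen_comb_list_spec : Claim_equal_gen_comb_list := by
  unfold Claim_equal_gen_comb_list
  intro ls _ hpre
  obtain ⟨hne, himp⟩ := hpre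
  unfold Spec_gen_comb_list
  rw [altB]
  show gen_comb_list ls = enumC ls
  rw [gen_comb_list]
  simp only [List.map_map, Function.comp_def]
  by_cases hlast : ls.getLastD [] = []
  · -- last list empty: the guard is false at once, both sides are []
    obtain ⟨a, ha⟩ : ∃ a, ls.getLast? = some a :=
      Option.isSome_iff_exists.mp (List.getLast?_isSome.mpr hne)
    have haval : a = [] := by
      rw [List.getLastD_eq_getLast?, ha] at hlast
      simpa using hlast
    have hmem : ([] : List Int) ∈ ls := haval ▸ List.mem_of_getLast? ha
    rw [enumC_nil_of_mem ls hmem]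
    rw [aLoop]
    rw [if_neg ?_]
    rw [pyGet_neg_one, pyGet_neg_one]
    have h1 : (ls.map (fun _ => (0 : Int))).getLast? = some 0 := by
      rw [List.getLast?_map, ha]; rfl
    have h2 : (ls.map (fun x => (x.length : Int))).getLast? = some 0 := by
      rw [List.getLast?_map, ha, haval]; rfl
    rw [h1, h2]
    simp
  · have hall : allNE ls := himp hlast
    have hzero := valid_zero ls hne hall
    have hrz := remC_zero ls hne hall
    have hflen : (remC (ls.map (fun _ => (0 : Int))) ls).length
        < (ls.map List.length).prod + 1 := by
      rw [hrz, enumC_len]; omega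
    rw [show (List.map (fun x => (x.length : Int)) ls) = radixC ls from rfl]
    rw [loop_eq ls hall _ _ [] hzero hflen, hrz, List.nil_append]
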